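-- pv_equiv track=rewrite | github.com/CentML/DeepView.Profile | deepview_profile/commands/gpu_estimation.py | joinIntervals
-- ===== SOURCE A (Python) =====
-- from collections import defaultdict
--
-- def joinIntervals(arr):
--     # arr = tuple(type,start,end,streamid)
--     eventDict = defaultdict(int)
--     filteredArr = []
--     prevRecord = list(arr[0])
--     for i in range(1,len(arr)):
--         newRecord = list(arr[i])
--         if prevRecord[1] <= newRecord[1] <= prevRecord[2]:
--             prevRecord[1] = min(prevRecord[1], newRecord[1])
--             prevRecord[2] = max(prevRecord[2], newRecord[2])
--         else:
--             filteredArr.append(prevRecord)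
--             prevRecord = newRecord
--     filteredArr.append(prevRecord) # last record does not enter the validation cycle. has to be included at the end
--     for item in filteredArr:
--         eventDict[item[0]] += (item[2]-item[1])
--     return eventDict
-- ===== SOURCE B (Python) =====
-- from collections import defaultdict
--
-- def _groups(records):
--     # Peel off one maximal overlapping group, yield its (type, duration), recurse on the rest.
--     t, s, e, _ = records[0]
--     i = 1
--     while i < len(records) and s <= records[i][1] <= e:
--         e = max(e, records[i][2])
--         i += 1
--     yield (t, e - s)
--     if i < len(records):
--         yield from _groups(records[i:])
--
-- def joinIntervals(arr):
--     eventDict = defaultdict(int)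
--     for t, dur in _groups(list(arr)):
--         eventDict[t] += dur
--     return eventDict
-- ===== Notes on version B (the rewrite author's own statement) =====
-- stated objective: alternative
-- what changed: B replaces A's stateful linear scan (prevRecord threaded through one loop building a filteredArr, then a second loop summing it) by a recursive group extractor: a generator peels off one maximal overlapping group at a time (inner while finds the group boundary, recursion on the remaining suffix) and yields (type, duration) pairs that the caller sums into the dict.
import Mathlib
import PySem

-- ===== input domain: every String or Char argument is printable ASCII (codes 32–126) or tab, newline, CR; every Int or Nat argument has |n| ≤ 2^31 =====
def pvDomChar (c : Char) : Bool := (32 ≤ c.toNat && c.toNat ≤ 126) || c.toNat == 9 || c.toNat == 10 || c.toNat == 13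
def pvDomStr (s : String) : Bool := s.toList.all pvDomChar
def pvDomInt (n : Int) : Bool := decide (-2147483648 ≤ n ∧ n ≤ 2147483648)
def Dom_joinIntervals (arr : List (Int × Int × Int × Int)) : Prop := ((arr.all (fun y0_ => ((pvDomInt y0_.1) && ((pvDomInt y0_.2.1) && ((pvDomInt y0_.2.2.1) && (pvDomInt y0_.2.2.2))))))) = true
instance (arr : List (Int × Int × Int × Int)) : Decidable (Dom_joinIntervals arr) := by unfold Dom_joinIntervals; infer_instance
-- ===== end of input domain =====

-- B replaces A's stateful scan + second summing pass by a recursive extractor of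
-- maximal overlapping groups yielding (type, duration) pairs: objective 'alternative'.

-- ===== PORT A =====
-- A's merge loop body: accumulate (filteredArr, prevRecord)
def aStep (acc : List (Int × Int × Int × Int) × (Int × Int × Int × Int))
    (cur : Int × Int × Int × Int) : List (Int × Int × Int × Int) × (Int × Int × Int × Int) :=
  let filtered := acc.1
  let prev := acc.2
  if prev.2.1 ≤ cur.2.1 ∧ cur.2.1 ≤ prev.2.2.1 then
    (filtered, (prev.1, min prev.2.1 cur.2.1, max prev.2.2.1 cur.2.2.1, prev.2.2.2))
  else
    (filtered ++ [prev], cur)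

-- A's second loop body: eventDict[item[0]] += item[2] - item[1]  (defaultdict(int))
def aDictAdd (d : PySem.Dict Int Int) (item : Int × Int × Int × Int) : PySem.Dict Int Int :=
  d.modify item.1 0 (· + (item.2.2.1 - item.2.1))

def joinIntervals (arr : List (Int × Int × Int × Int)) : List (Int × Int) :=
  match arr with
  | [] => []  -- unreachable: Python raises IndexError at arr[0]; excluded by Pre_
  | p :: rest =>
    let st := rest.foldl aStep ([], p)
    let filteredArr := st.1 ++ [st.2]
    (filteredArr.foldl aDictAdd PySem.Dict.empty).items

-- ===== PORT B =====
-- B's inner while loop: extend e over the overlapping prefix, return final e and the remainder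
def takeGroup (s e : Int) : List (Int × Int × Int × Int) → Int × List (Int × Int × Int × Int)
  | [] => (e, [])
  | cur :: rs =>
    if s ≤ cur.2.1 ∧ cur.2.1 ≤ e then takeGroup s (max e cur.2.2.1) rs
    else (e, cur :: rs)

-- needed by `groups` for termination
theorem takeGroup_len (s e : Int) (l : List (Int × Int × Int × Int)) :
    (takeGroup s e l).2.length ≤ l.length := by
  induction l generalizing e with
  | nil => simp [takeGroup]
  | cons cur rs ih =>
    simp only [takeGroup]
    split
    · exact le_trans (ih _) (Nat.le_succ _)
    · simp

-- B's recursive generator _groups: one maximal group, then recurse on the remainder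
def groups : List (Int × Int × Int × Int) → List (Int × Int)
  | [] => []
  | p :: rest =>
    let r := takeGroup p.2.1 p.2.2.1 rest
    (p.1, r.1 - p.2.1) :: groups r.2
termination_by l => l.length
decreasing_by
  exact Nat.lt_succ_of_le (takeGroup_len _ _ _)

-- B's top function: sum the yielded (type, duration) pairs into the defaultdict
def joinIntervals_alt (arr : List (Int × Int × Int × Int)) : List (Int × Int) :=
  ((groups arr).foldl (fun d p => d.modify p.1 0 (· + p.2)) PySem.Dict.empty).items

-- ===== PRECONDITION & SPEC =====
-- A raises IndexError at arr[0] on the empty list; Pre_ excludes exactly that input.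
def Pre_joinIntervals (arr : List (Int × Int × Int × Int)) : Prop := arr ≠ []
instance (arr : List (Int × Int × Int × Int)) : Decidable (Pre_joinIntervals arr) := by unfold Pre_joinIntervals; infer_instance
def pvWitness_joinIntervals : (List (Int × Int × Int × Int)) := [(0, 0, 2, 0), (1, 5, 7, 0)]

def Spec_joinIntervals (arr : List (Int × Int × Int × Int)) (out : List (Int × Int)) : Prop := out = joinIntervals_alt arr
instance (arr : List (Int × Int × Int × Int)) (out : List (Int × Int)) : Decidable (Spec_joinIntervals arr out) := by unfold Spec_joinIntervals; infer_instance

-- ===== CLAIM (what is proved, stated in full; the proofs are below) =====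
def Claim_equal_joinIntervals : Prop := ∀ (arr : List (Int × Int × Int × Int)), Dom_joinIntervals arr → Pre_joinIntervals arr → Spec_joinIntervals arr (joinIntervals arr)

-- ===== LEMMAS AND PROOFS =====

-- the (type, duration) projection of a merged record
def projTD (item : Int × Int × Int × Int) : Int × Int := (item.1, item.2.2.1 - item.2.1)

-- A's merged list, projected to (type, duration), is exactly B's group list.
theorem merged_eq_groups (rest : List (Int × Int × Int × Int))
    (prev : Int × Int × Int × Int) (filtered : List (Int × Int × Int × Int)) :
    ((rest.foldl aStep (filtered, prev)).1 ++ [(rest.foldl aStep (filtered, prev)).2]).map projTD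
      = filtered.map projTD ++ groups (prev :: rest) := by
  induction rest generalizing prev filtered with
  | nil => simp [groups, takeGroup, projTD]
  | cons cur rs ih =>
    simp only [List.foldl_cons]
    by_cases h : prev.2.1 ≤ cur.2.1 ∧ cur.2.1 ≤ prev.2.2.1
    · rw [show aStep (filtered, prev) cur
            = (filtered, (prev.1, min prev.2.1 cur.2.1, max prev.2.2.1 cur.2.2.1, prev.2.2.2))
          from by simp [aStep, h]]
      rw [ih (prev.1, min prev.2.1 cur.2.1, max prev.2.2.1 cur.2.2.1, prev.2.2.2) filtered]
      rw [show groups (prev :: cur :: rs)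
            = groups ((prev.1, min prev.2.1 cur.2.1, max prev.2.2.1 cur.2.2.1, prev.2.2.2) :: rs)
          from by
            conv_lhs => rw [groups]
            conv_rhs => rw [groups]
            simp [takeGroup, h]]
    · rw [show aStep (filtered, prev) cur = (filtered ++ [prev], cur) from by simp [aStep, h]]
      rw [ih cur (filtered ++ [prev])]
      rw [show groups (prev :: cur :: rs) = projTD prev :: groups (cur :: rs)
          from by
            conv_lhs => rw [groups]
            simp [takeGroup, h, projTD]]
      simp

-- summing durations: A's dict loop over items equals B's dict loop over projections
theorem foldl_aDictAdd_eq (l : List (Int × Int × Int × Int)) (d : PySem.Dict Int Int) :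
    l.foldl aDictAdd d = (l.map projTD).foldl (fun d p => d.modify p.1 0 (· + p.2)) d := by
  induction l generalizing d with
  | nil => rfl
  | cons x xs ih => simp [aDictAdd, projTD, ih]

-- ===== VERDICT (by name: the statement is the Claim_ definition above) =====
theorem joinIntervals_spec : Claim_equal_joinIntervals := by
  intro arr _ hpre
  unfold Spec_joinIntervals
  match arr with
  | [] => exact absurd rfl hpre
  | p :: rest =>
    show joinIntervals _ = _
    unfold joinIntervals joinIntervals_alt
    simp only
    rw [foldl_aDictAdd_eq, merged_eq_groups rest p []]
    simp
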